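-- pv_equiv track=rewrite | github.com/GanduriKumar/BusinessProcess | skills/career-content-writer/scripts/generate_week_content_pack.py | strip_noise
-- ===== SOURCE A (Python) =====
-- def strip_noise(text: str) -> str:
--     replacements = {
--         "In today's rapidly evolving landscape": "Right now",
--         "leverage": "use",
--         "utilize": "use",
--         "journey": "shift",
--         "unlock": "create",
--         "reimagine": "improve",
--         "delve into": "look at",
--     }
--     for src, dst in replacements.items():
--         text = text.replace(src, dst)
--     return text
-- ===== SOURCE B (Python) =====
-- def strip_noise(text: str) -> str:
--     replacements = {
--         "In today's rapidly evolving landscape": "Right now",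
--         "leverage": "use",
--         "utilize": "use",
--         "journey": "shift",
--         "unlock": "create",
--         "reimagine": "improve",
--         "delve into": "look at",
--     }
--     items = list(replacements.items())
--     out = []
--     i = 0
--     n = len(text)
--     while i < n:
--         for src, dst in items:
--             if text.startswith(src, i):
--                 out.append(dst)
--                 i += len(src)
--                 break
--         else:
--             out.append(text[i])
--             i += 1
--     return "".join(out)
-- ===== Notes on version B (the rewrite author's own statement) =====
-- stated objective: alternative
-- what changed: A makes seven sequential full-text str.replace passes (one per buzzword); B does a single left-to-right scan over the text, trying all seven keys at each position (in dict order) and emitting the replacement or the current character, which is valid because no key overlaps another key, no key can start inside a replacement target, and no replacement can complete a key across a boundary.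
import Mathlib
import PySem

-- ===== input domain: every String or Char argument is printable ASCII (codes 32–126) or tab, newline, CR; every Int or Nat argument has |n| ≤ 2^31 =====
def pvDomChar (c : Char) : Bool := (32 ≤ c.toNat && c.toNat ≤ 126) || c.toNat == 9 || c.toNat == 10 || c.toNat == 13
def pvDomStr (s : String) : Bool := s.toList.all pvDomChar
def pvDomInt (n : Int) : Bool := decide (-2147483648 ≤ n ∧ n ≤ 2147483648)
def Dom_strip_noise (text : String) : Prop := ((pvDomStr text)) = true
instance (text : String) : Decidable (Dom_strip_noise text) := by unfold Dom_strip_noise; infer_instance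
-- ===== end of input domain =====

-- B replaces A's seven sequential full-text replace() passes by one left-to-right scan that
-- tries all seven keys at each position (alternative single-pass algorithm, same result).

-- ===== PORT A =====
def strip_noise (text : String) : String :=
  let replacements : PySem.Dict String String := PySem.Dict.mk
    [("In today's rapidly evolving landscape", "Right now"),
     ("leverage", "use"),
     ("utilize", "use"),
     ("journey", "shift"),
     ("unlock", "create"),
     ("reimagine", "improve"),
     ("delve into", "look at")]
  replacements.items.foldl (fun t kv => PySem.Str.replace t kv.1 kv.2) text

-- ===== PORT B =====
-- the (src, dst) pairs, in dict insertion order, as char lists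
def pvKeys : List (List Char × List Char) :=
  [("In today's rapidly evolving landscape".toList, "Right now".toList),
   ("leverage".toList, "use".toList),
   ("utilize".toList, "use".toList),
   ("journey".toList, "shift".toList),
   ("unlock".toList, "create".toList),
   ("reimagine".toList, "improve".toList),
   ("delve into".toList, "look at".toList)]

-- B's while-loop: at each position try the keys in order (find? = the inner for/break);
-- fuel = remaining length bounds the iteration count exactly as `i < n` does.
def pvScan (ks : List (List Char × List Char)) : Nat → List Char → List Char
  | _, [] => []
  | 0, l => l
  | fuel+1, c :: s =>
    match ks.find? (fun kv => kv.1.isPrefixOf (c :: s)) with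
    | some kv => kv.2 ++ pvScan ks fuel ((c :: s).drop kv.1.length)
    | none => c :: pvScan ks fuel s

def strip_noise_alt (text : String) : String :=
  String.ofList (pvScan pvKeys text.toList.length text.toList)

-- ===== PRECONDITION & SPEC =====
def Spec_strip_noise (text : String) (out : String) : Prop := out = strip_noise_alt text
instance (text : String) (out : String) : Decidable (Spec_strip_noise text out) := by unfold Spec_strip_noise; infer_instance

-- ===== CLAIM (what is proved, stated in full; the proofs are below) =====
def Claim_equal_strip_noise : Prop := ∀ (text : String), Dom_strip_noise text → Spec_strip_noise text (strip_noise text)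

-- ===== LEMMAS AND PROOFS =====

-- structural reference version of one replace() pass
def pvRep (p t : List Char) : List Char → List Char
  | [] => []
  | c :: s =>
    if h : p ≠ [] ∧ p.isPrefixOf (c :: s) then t ++ pvRep p t ((c :: s).drop p.length)
    else c :: pvRep p t s
termination_by l => l.length
decreasing_by
  · have hlen : 1 ≤ p.length := by
      rcases p with _ | ⟨d, p'⟩
      · exact absurd rfl h.1
      · simp
    simp
    omega
  · simp

lemma pvRep_nil (p t : List Char) : pvRep p t [] = [] := by rw [pvRep]

lemma pvRep_cons_pos (p t : List Char) (c : Char) (s : List Char) (hp : p ≠ [])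
    (hpre : p.isPrefixOf (c :: s) = true) :
    pvRep p t (c :: s) = t ++ pvRep p t ((c :: s).drop p.length) := by
  rw [pvRep]; simp [hp, hpre]

lemma pvRep_cons_neg (p t : List Char) (c : Char) (s : List Char)
    (hpre : ¬ p.isPrefixOf (c :: s) = true) :
    pvRep p t (c :: s) = c :: pvRep p t s := by
  rw [pvRep]; simp [hpre]

lemma pvRep_go (p t : List Char) (hp : p ≠ []) :
    ∀ fuel l acc, l.length ≤ fuel →
      PySem.Chars.replace.go p t fuel l acc = acc.reverse ++ pvRep p t l := by
  intro fuel
  induction fuel with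
  | zero =>
    intro l acc hl
    have : l = [] := List.eq_nil_of_length_eq_zero (Nat.le_zero.mp hl)
    subst this
    rw [PySem.Chars.replace.go.eq_def]
    simp [pvRep_nil]
  | succ n ih =>
    intro l acc hl
    cases l with
    | nil => rw [PySem.Chars.replace.go.eq_def]; simp [pvRep_nil]
    | cons c s =>
      rw [PySem.Chars.replace.go.eq_def]
      simp only []
      by_cases hpre : p.isPrefixOf (c :: s) = true
      · rw [if_pos hpre]
        have hlen : 1 ≤ p.length := by
          rcases p with _ | _
          · exact absurd rfl hp
          · simp
        have hdrop : ((c :: s).drop p.length).length ≤ n := by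
          simp at hl ⊢; omega
        rw [ih _ _ hdrop, pvRep_cons_pos p t c s hp hpre]
        simp
      · rw [if_neg hpre]
        have : s.length ≤ n := by simp at hl; omega
        rw [ih _ _ this, pvRep_cons_neg p t c s hpre]
        simp


lemma pvReplace_eq (p t l : List Char) (hp : p ≠ []) :
    PySem.Chars.replace l p t = pvRep p t l := by
  rw [PySem.Chars.replace]
  have : p.isEmpty = false := by simp [hp]
  rw [this]
  simp only [Bool.false_eq_true, if_false]
  rw [pvRep_go p t hp l.length l [] (le_refl _)]
  simp


-- agreement of two lists on their common prefix length
abbrev pvAgree (a b : List Char) : Prop := a.take b.length = b.take a.length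

lemma pvAgree_of_prefix_append {a b X : List Char} (h : a <+: b ++ X) : pvAgree a b := by
  obtain ⟨r, hr⟩ := h
  unfold pvAgree
  apply List.ext_getElem
  · simp; omega
  · intro i h1 h2
    simp only [List.getElem_take]
    have hi1 : i < a.length := by simp at h1; omega
    have hi2 : i < b.length := by simp at h2; omega
    have : (a ++ r)[i]'(by simp; omega) = (b ++ X)[i]'(by simp; omega) := by
      simp [hr]
    rwa [List.getElem_append_left hi1, List.getElem_append_left hi2] at this


-- prefixes of equal length of the same list are equal
lemma pvPrefix_take {a y : List Char} (h : a <+: y) : y.take a.length = a := by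
  obtain ⟨r, rfl⟩ := h; exact List.take_left

-- pvRep leaves a match-free prefix of length k unchanged
lemma pvRep_skip (p t : List Char) :
    ∀ (k : Nat) (u : List Char), (∀ j, j < k → ¬ p <+: u.drop j) →
      pvRep p t u = u.take k ++ pvRep p t (u.drop k) := by
  intro k
  induction k with
  | zero => intro u _; simp
  | succ n ih =>
    intro u hu
    cases u with
    | nil => simp [pvRep_nil]
    | cons c s =>
      have h0 : ¬ p <+: (c :: s) := by
        have := hu 0 (Nat.succ_pos n); simpa using this
      have hpre : ¬ p.isPrefixOf (c :: s) = true := by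
        rw [List.isPrefixOf_iff_prefix]; exact h0
      rw [pvRep_cons_neg p t c s hpre]
      have hs : ∀ j, j < n → ¬ p <+: s.drop j := by
        intro j hj
        have := hu (j + 1) (by omega)
        simpa using this
      rw [ih s hs]
      simp


-- no match at all: pvRep is the identity
lemma pvRep_id (p t u : List Char) (h : ∀ j, ¬ p <+: u.drop j) : pvRep p t u = u := by
  rw [pvRep_skip p t u.length u (fun j _ => h j)]
  simp [pvRep_nil]


-- first-match decomposition
lemma pvRep_firstMatch (p t : List Char) (hp : p ≠ []) (u : List Char) (m : Nat)
    (hm : p <+: u.drop m) (hmin : ∀ j, j < m → ¬ p <+: u.drop j) :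
    pvRep p t u = u.take m ++ t ++ pvRep p t (u.drop (m + p.length)) := by
  rw [pvRep_skip p t m u hmin]
  have hne : u.drop m ≠ [] := by
    intro hnil
    rw [hnil] at hm
    exact hp (List.prefix_nil.mp hm)
  obtain ⟨c, s, hcs⟩ := List.exists_cons_of_ne_nil hne
  rw [hcs]
  rw [pvRep_cons_pos p t c s hp (by rw [List.isPrefixOf_iff_prefix, ← hcs]; exact hm)]
  rw [← hcs, List.drop_drop, List.append_assoc]


-- ==== pvScan machinery: fuel irrelevance and step lemmas ====

lemma pvScan_irrel (ks : List (List Char × List Char)) (hks : ∀ kv ∈ ks, kv.1 ≠ []) :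
    ∀ f g s, s.length ≤ f → s.length ≤ g → pvScan ks f s = pvScan ks g s := by
  intro f
  induction f with
  | zero =>
    intro g s hf _
    have : s = [] := List.eq_nil_of_length_eq_zero (Nat.le_zero.mp hf)
    subst this
    cases g <;> rfl
  | succ n ih =>
    intro g s hf hg
    cases s with
    | nil => cases g <;> rfl
    | cons c s' =>
      cases g with
      | zero => simp at hg
      | succ m =>
        show pvScan ks (n+1) (c :: s') = pvScan ks (m+1) (c :: s')
        rw [pvScan, pvScan]
        cases hfind : ks.find? (fun kv => kv.1.isPrefixOf (c :: s')) with
        | some kv =>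
          simp only [hfind]
          have hmem := List.mem_of_find?_eq_some hfind
          have hkne : kv.1 ≠ [] := hks kv hmem
          have hlen : 1 ≤ kv.1.length := by
            rcases h : kv.1 with _ | _
            · exact absurd h hkne
            · simp
          have h1 : ((c :: s').drop kv.1.length).length ≤ n := by simp at hf ⊢; omega
          have h2 : ((c :: s').drop kv.1.length).length ≤ m := by simp at hg ⊢; omega
          rw [ih m _ h1 h2]
        | none =>
          simp only [hfind]
          have h1 : s'.length ≤ n := by simp at hf; omega
          have h2 : s'.length ≤ m := by simp at hg; omega
          rw [ih m _ h1 h2]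


def pvScanN (ks : List (List Char × List Char)) (s : List Char) : List Char :=
  pvScan ks s.length s

lemma pvScanN_nil (ks : List (List Char × List Char)) : pvScanN ks [] = [] := rfl

lemma pvScanN_cons_some (ks : List (List Char × List Char)) (hks : ∀ kv ∈ ks, kv.1 ≠ [])
    (c : Char) (s : List Char) (kv : List Char × List Char)
    (h : ks.find? (fun kv => kv.1.isPrefixOf (c :: s)) = some kv) :
    pvScanN ks (c :: s) = kv.2 ++ pvScanN ks ((c :: s).drop kv.1.length) := by
  show pvScan ks (s.length + 1) (c :: s) = _
  rw [pvScan]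
  simp only [h]
  congr 1
  have hkne : kv.1 ≠ [] := hks kv (List.mem_of_find?_eq_some h)
  have hlen : 1 ≤ kv.1.length := by
    rcases hh : kv.1 with _ | _
    · exact absurd hh hkne
    · simp
  exact pvScan_irrel ks hks s.length _ _ (by simp; omega) (le_refl _)


lemma pvScanN_cons_none (ks : List (List Char × List Char)) (hks : ∀ kv ∈ ks, kv.1 ≠ [])
    (c : Char) (s : List Char)
    (h : ks.find? (fun kv => kv.1.isPrefixOf (c :: s)) = none) :
    pvScanN ks (c :: s) = c :: pvScanN ks s := by
  show pvScan ks (s.length + 1) (c :: s) = _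
  rw [pvScan]
  simp only [h]
  rfl


-- a block inside which no key can start passes through the scan
lemma pvScanN_append (ks : List (List Char × List Char)) (hks : ∀ kv ∈ ks, kv.1 ≠ []) :
    ∀ (u X : List Char), (∀ kv ∈ ks, ∀ j, j < u.length → ¬ pvAgree kv.1 (u.drop j)) →
      pvScanN ks (u ++ X) = u ++ pvScanN ks X := by
  intro u
  induction u with
  | nil => intro X _; simp
  | cons a u' ih =>
    intro X hcond
    have hnone : ks.find? (fun kv => kv.1.isPrefixOf (a :: u' ++ X)) = none := by
      rw [List.find?_eq_none]
      intro kv hmem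
      simp only [Bool.not_eq_true]
      rw [← Bool.not_eq_true, List.isPrefixOf_iff_prefix]
      intro hpre
      have : pvAgree kv.1 (a :: u') := pvAgree_of_prefix_append (by simpa using hpre)
      exact hcond kv hmem 0 (by simp) (by simpa using this)
    have : (a :: u') ++ X = a :: (u' ++ X) := rfl
    rw [this] at hnone ⊢
    rw [pvScanN_cons_none ks hks a (u' ++ X) hnone]
    rw [ih X (fun kv hm j hj => by
      have := hcond kv hm (j+1) (by simp; omega)
      simpa using this)]
    rfl


-- find? transfers from y to kv.1 ++ W when keys pairwise conflict
lemma pvFind_transfer (W : List Char) :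
    ∀ (ks : List (List Char × List Char)) (y : List Char),
      ks.Pairwise (fun a b => ¬ pvAgree a.1 b.1) →
      ∀ kv, ks.find? (fun e => e.1.isPrefixOf y) = some kv →
        ks.find? (fun e => e.1.isPrefixOf (kv.1 ++ W)) = some kv := by
  intro ks
  induction ks with
  | nil => intro y _ kv h; simp at h
  | cons e rest ih =>
    intro y hpw kv h
    by_cases he : e.1.isPrefixOf y = true
    · rw [List.find?_cons] at h
      simp only [he] at h
      cases h
      have hkv : e.1.isPrefixOf (e.1 ++ W) = true := by
        rw [List.isPrefixOf_iff_prefix]; exact List.prefix_append _ _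
      rw [List.find?_cons]
      simp only [hkv]
    · rw [List.find?_cons] at h
      simp only [Bool.not_eq_true] at he
      simp only [he] at h
      have hkvmem := List.mem_of_find?_eq_some h
      have hkvpre : kv.1.isPrefixOf y = true := by
        have := List.find?_some h
        simpa using this
      have hepre : ¬ e.1.isPrefixOf (kv.1 ++ W) = true := by
        intro habs
        rw [List.isPrefixOf_iff_prefix] at habs
        have hag : pvAgree e.1 kv.1 := pvAgree_of_prefix_append habs
        by_cases heq : e.1 = kv.1
        · rw [heq] at he; rw [hkvpre] at he; cases he
        · exact (List.pairwise_cons.mp hpw).1 kv hkvmem hag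
      rw [List.find?_cons]
      simp only [Bool.not_eq_true] at hepre
      simp only [hepre]
      exact ih y (List.pairwise_cons.mp hpw).2 kv h


-- ==== main step lemma: scanning with (p,t) in front = scanning after one replace pass ====

lemma pvStep (p t : List Char) (ks : List (List Char × List Char))
    (hp : p ≠ [])
    (hks : ∀ kv ∈ ks, kv.1 ≠ [])
    (hpw : ks.Pairwise (fun a b => ¬ pvAgree a.1 b.1))
    (hD : ∀ kv ∈ ks, ∀ j, j < kv.1.length → 1 ≤ j → ¬ pvAgree p (kv.1.drop j))
    (hC : ∀ kv ∈ ks, ∀ j, j < t.length → ¬ pvAgree kv.1 (t.drop j))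
    (hG : ∀ kv ∈ ks, ∀ j, j < kv.1.length → 1 ≤ j → ¬ pvAgree (kv.1.drop j) t) :
    ∀ s, pvScanN ((p, t) :: ks) s = pvScanN ks (pvRep p t s) := by
  have hksF : ∀ kv ∈ (p, t) :: ks, kv.1 ≠ [] := by
    intro kv hkv
    rcases List.mem_cons.mp hkv with h | h
    · rw [h]; exact hp
    · exact hks kv h
  suffices H : ∀ n s, s.length ≤ n → pvScanN ((p, t) :: ks) s = pvScanN ks (pvRep p t s) by
    intro s; exact H s.length s le_rfl
  intro n
  induction n with
  | zero =>
    intro s hs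
    have : s = [] := List.eq_nil_of_length_eq_zero (Nat.le_zero.mp hs)
    subst this
    rw [pvRep_nil, pvScanN_nil, pvScanN_nil]
  | succ n ih =>
    intro s hs
    cases s with
    | nil => rw [pvRep_nil, pvScanN_nil, pvScanN_nil]
    | cons c s' =>
      have hplen : 1 ≤ p.length := by
        rcases hq : p with _ | _
        · exact absurd hq hp
        · simp
      by_cases hpre : p.isPrefixOf (c :: s') = true
      · -- the front key p matches at position 0
        have hfind : ((p, t) :: ks).find? (fun kv => kv.1.isPrefixOf (c :: s')) = some (p, t) := by
          rw [List.find?_cons]; simp only [hpre]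
        rw [pvScanN_cons_some _ hksF c s' (p, t) hfind]
        have hdlen : ((c :: s').drop p.length).length ≤ n := by simp at hs ⊢; omega
        rw [ih _ hdlen]
        rw [pvRep_cons_pos p t c s' hp hpre]
        rw [pvScanN_append ks hks t _ (fun kv hm j hj => hC kv hm j hj)]
      · cases hfind : ks.find? (fun kv => kv.1.isPrefixOf (c :: s')) with
        | some qu =>
          -- some later key qu matches at position 0 (p does not)
          have hfindF : ((p, t) :: ks).find? (fun kv => kv.1.isPrefixOf (c :: s')) = some qu := by
            rw [List.find?_cons]
            simp only [Bool.not_eq_true] at hpre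
            simp only [hpre]
            exact hfind
          have hqmem := List.mem_of_find?_eq_some hfind
          have hqpre : qu.1 <+: (c :: s') := by
            have := List.find?_some hfind
            rwa [List.isPrefixOf_iff_prefix] at this
          have hqne : qu.1 ≠ [] := hks qu hqmem
          have hqlen : 1 ≤ qu.1.length := by
            rcases hq : qu.1 with _ | _
            · exact absurd hq hqne
            · simp
          have hqle : qu.1.length ≤ s'.length + 1 := by
            have := hqpre.length_le; simpa using this
          rw [pvScanN_cons_some _ hksF c s' qu hfindF]
          have hdlen : ((c :: s').drop qu.1.length).length ≤ n := by simp at hs ⊢; omega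
          rw [ih _ hdlen]
          -- now compute the right-hand side
          have hnomatch : ∀ j, j < qu.1.length - 1 → ¬ p <+: s'.drop j := by
            intro j hj hpj
            obtain ⟨w, hw⟩ := hqpre
            have hsplit : s'.drop j = qu.1.drop (j + 1) ++ w := by
              have h1 : (c :: s').drop (j + 1) = s'.drop j := by simp
              rw [← h1, ← hw, List.drop_append_of_le_length (by omega)]
            rw [hsplit] at hpj
            exact hD qu hqmem (j + 1) (by omega) (by omega) (pvAgree_of_prefix_append hpj)
          have hrep2 : pvRep p t (c :: s') =
              qu.1 ++ pvRep p t (s'.drop (qu.1.length - 1)) := by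
            rw [pvRep_cons_neg p t c s' hpre]
            rw [pvRep_skip p t (qu.1.length - 1) s' hnomatch]
            have htake : c :: s'.take (qu.1.length - 1) = qu.1 := by
              have h1 : (c :: s').take qu.1.length = qu.1 := pvPrefix_take hqpre
              rw [← h1]
              cases hq : qu.1.length with
              | zero => omega
              | succ k => simp
            calc c :: (s'.take (qu.1.length - 1) ++ pvRep p t (s'.drop (qu.1.length - 1)))
                = (c :: s'.take (qu.1.length - 1)) ++ pvRep p t (s'.drop (qu.1.length - 1)) := rfl
              _ = qu.1 ++ pvRep p t (s'.drop (qu.1.length - 1)) := by rw [htake]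
          have hWdef : s'.drop (qu.1.length - 1) = (c :: s').drop qu.1.length := by
            cases hq : qu.1.length with
            | zero => omega
            | succ k => simp
          rw [hrep2, hWdef]
          set W := pvRep p t ((c :: s').drop qu.1.length) with hWd
          have hfind2 : ks.find? (fun e => e.1.isPrefixOf (qu.1 ++ W)) = some qu :=
            pvFind_transfer W ks (c :: s') hpw qu hfind
          -- unfold the scan once on qu.1 ++ W
          obtain ⟨d, q', hq1⟩ := List.exists_cons_of_ne_nil hqne
          have hconsform : qu.1 ++ W = d :: (q' ++ W) := by rw [hq1]; rfl
          rw [hconsform] at hfind2 ⊢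
          rw [pvScanN_cons_some ks hks d (q' ++ W) qu hfind2]
          congr 1
          have : (d :: (q' ++ W)).drop qu.1.length = W := by
            rw [← hconsform, List.drop_append_of_le_length (le_refl _), List.drop_length]
            rfl
          rw [this]
        | none =>
          -- no key matches at position 0
          have hfindF : ((p, t) :: ks).find? (fun kv => kv.1.isPrefixOf (c :: s')) = none := by
            rw [List.find?_cons]
            simp only [Bool.not_eq_true] at hpre
            simp only [hpre]
            exact hfind
          rw [pvScanN_cons_none _ hksF c s' hfindF]
          have hslen : s'.length ≤ n := by simp at hs; omega
          rw [ih _ hslen]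
          rw [pvRep_cons_neg p t c s' hpre]
          -- it suffices that no key of ks matches c :: pvRep p t s' at position 0
          have hnone2 : ks.find? (fun kv => kv.1.isPrefixOf (c :: pvRep p t s')) = none := by
            rw [List.find?_eq_none]
            intro kv hmem habs
            simp only [List.isPrefixOf_iff_prefix] at habs
            have hkvfail : ¬ kv.1 <+: (c :: s') := by
              have := List.find?_eq_none.mp hfind kv hmem
              simpa [List.isPrefixOf_iff_prefix] using this
            by_cases hex : ∃ j, p <+: s'.drop j
            · have hm : p <+: s'.drop (Nat.find hex) := Nat.find_spec hex
              have hmin : ∀ j, j < Nat.find hex → ¬ p <+: s'.drop j :=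
                fun j hj => Nat.find_min hex hj
              set m := Nat.find hex with hmdef
              have hmlt : m < s'.length := by
                by_contra hge
                push Not at hge
                rw [List.drop_eq_nil_of_le hge] at hm
                exact hp (List.prefix_nil.mp hm)
              have hz : pvRep p t s' =
                  s'.take m ++ t ++ pvRep p t (s'.drop (m + p.length)) :=
                pvRep_firstMatch p t hp s' m hm hmin
              rw [hz] at habs
              have habs' : kv.1 <+: (c :: s'.take m) ++ (t ++ pvRep p t (s'.drop (m + p.length))) := by
                simpa using habs
              have habs2 : kv.1 <+: (c :: s'.take m) ++ (t ++ pvRep p t (s'.drop (m + p.length))) := by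
                simpa [List.append_assoc] using habs
              have hlenA : (c :: s'.take m).length = m + 1 := by simp; omega
              by_cases hrlen : kv.1.length ≤ m + 1
              · -- kv.1 would already match the unchanged text
                have h1 : kv.1 <+: c :: s'.take m := by
                  have h2 := pvPrefix_take habs2
                  rw [List.take_append_of_le_length (by omega)] at h2
                  rw [← h2]
                  exact List.take_prefix _ _
                have : kv.1 <+: (c :: s') :=
                  h1.trans (by
                    have h3 : c :: s'.take m = (c :: s').take (m + 1) := by simp
                    rw [h3]
                    exact List.take_prefix _ _)
                exact hkvfail this
              · -- kv.1 extends into the inserted target t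
                push Not at hrlen
                obtain ⟨w, hw⟩ := habs2
                have htake : kv.1.take (m + 1) = c :: s'.take m := by
                  have h2 : (kv.1 ++ w).take (m + 1) = kv.1.take (m + 1) :=
                    List.take_append_of_le_length (by omega)
                  rw [← h2, hw, List.take_append_of_le_length (by omega), ← hlenA,
                    List.take_length]
                have hsplitkv : (c :: s'.take m) ++ kv.1.drop (m + 1) = kv.1 := by
                  rw [← htake]; exact List.take_append_drop _ _
                have hr' : kv.1.drop (m + 1) <+: t ++ pvRep p t (s'.drop (m + p.length)) := by
                  refine ⟨w, ?_⟩
                  have h4 := hw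
                  rw [← hsplitkv, List.append_assoc] at h4
                  exact List.append_cancel_left h4
                exact hG kv hmem (m + 1) (by omega) (by omega) (pvAgree_of_prefix_append hr')
            · -- p never matches in s': the pass is the identity there
              push Not at hex
              rw [pvRep_id p t s' hex] at habs
              exact hkvfail habs
          rw [pvScanN_cons_none ks hks c _ hnone2]

lemma pvScanN_nil_keys (s : List Char) : pvScanN [] s = s := by
  induction s with
  | nil => rfl
  | cons c s' ih =>
    rw [pvScanN_cons_none [] (by simp) c s' (by simp)]
    rw [ih]


lemma pvChain (s : List Char) : pvScanN pvKeys s =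
    pvRep "delve into".toList "look at".toList
      (pvRep "reimagine".toList "improve".toList
        (pvRep "unlock".toList "create".toList
          (pvRep "journey".toList "shift".toList
            (pvRep "utilize".toList "use".toList
              (pvRep "leverage".toList "use".toList
                (pvRep "In today's rapidly evolving landscape".toList "Right now".toList s)))))) := by
  simp only [pvKeys]
  rw [pvStep "In today's rapidly evolving landscape".toList "Right now".toList _
    (by decide) (by decide) (by decide) (by decide) (by decide) (by decide)]
  rw [pvStep "leverage".toList "use".toList _
    (by decide) (by decide) (by decide) (by decide) (by decide) (by decide)]
  rw [pvStep "utilize".toList "use".toList _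
    (by decide) (by decide) (by decide) (by decide) (by decide) (by decide)]
  rw [pvStep "journey".toList "shift".toList _
    (by decide) (by decide) (by decide) (by decide) (by decide) (by decide)]
  rw [pvStep "unlock".toList "create".toList _
    (by decide) (by decide) (by decide) (by decide) (by decide) (by decide)]
  rw [pvStep "reimagine".toList "improve".toList _
    (by decide) (by decide) (by decide) (by decide) (by decide) (by decide)]
  rw [pvStep "delve into".toList "look at".toList _
    (by decide) (by decide) (by decide) (by decide) (by decide) (by decide)]
  rw [pvScanN_nil_keys]

-- ===== VERDICT (by name: the statement is the Claim_ definition above) =====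
theorem strip_noise_spec : Claim_equal_strip_noise := by
  intro text _
  show strip_noise text = strip_noise_alt text
  have hA : strip_noise text =
      PySem.Str.replace (PySem.Str.replace (PySem.Str.replace (PySem.Str.replace
        (PySem.Str.replace (PySem.Str.replace (PySem.Str.replace text
          "In today's rapidly evolving landscape" "Right now")
          "leverage" "use") "utilize" "use") "journey" "shift")
          "unlock" "create") "reimagine" "improve") "delve into" "look at" := rfl
  have hAList : (strip_noise text).toList =
      pvRep "delve into".toList "look at".toList
        (pvRep "reimagine".toList "improve".toList
          (pvRep "unlock".toList "create".toList
            (pvRep "journey".toList "shift".toList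
              (pvRep "utilize".toList "use".toList
                (pvRep "leverage".toList "use".toList
                  (pvRep "In today's rapidly evolving landscape".toList "Right now".toList
                    text.toList)))))) := by
    rw [hA]
    simp only [PySem.Str.toList_replace]
    rw [pvReplace_eq _ _ _ (by decide), pvReplace_eq _ _ _ (by decide),
      pvReplace_eq _ _ _ (by decide), pvReplace_eq _ _ _ (by decide),
      pvReplace_eq _ _ _ (by decide), pvReplace_eq _ _ _ (by decide),
      pvReplace_eq _ _ _ (by decide)]
  have hBList : (strip_noise_alt text).toList = pvScanN pvKeys text.toList := by
    show (String.ofList (pvScan pvKeys text.toList.length text.toList)).toList = _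
    simp [pvScanN]
  have hEq : (strip_noise text).toList = (strip_noise_alt text).toList := by
    rw [hAList, hBList, pvChain]
  calc strip_noise text = String.ofList (strip_noise text).toList := by simp
    _ = String.ofList (strip_noise_alt text).toList := by rw [hEq]
    _ = strip_noise_alt text := by simp
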